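-- pv_equiv track=rewrite | github.com/dominik737/NetworkEntityAttackPrediction | Evaluation/Normalizator.py | get_detail_info
-- ===== SOURCE A (Python) =====
-- def get_detail_info(detail: str, info_key: str) -> str:
--     i = detail.find(info_key) + len(info_key)
--     info = ""
--     while i < len(detail):
--         char = detail[i]
--         if char == "," or (char == "." and i == len(detail) - 1):
--             break
--         if char == " " or char == ":":
--             i += 1
--             continue
--         info += char
--         i += 1
--     return info
-- ===== SOURCE B (Python) =====
-- def get_detail_info(detail: str, info_key: str) -> str:
--     i = detail.find(info_key) + len(info_key)
--     segment = detail[i:]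
--     if ',' in segment:
--         segment = segment[:segment.index(',')]
--     elif segment.endswith('.'):
--         segment = segment[:-1]
--     return ''.join(ch for ch in segment if ch not in ' :')
-- ===== Notes on version B (the rewrite author's own statement) =====
-- stated objective: simpler
-- what changed: Replaces the char-by-char while/break/continue state machine with locate-then-filter: take the suffix after the key, cut at the first comma (or drop a single trailing period when no comma), then filter out spaces and colons.
import Mathlib
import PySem

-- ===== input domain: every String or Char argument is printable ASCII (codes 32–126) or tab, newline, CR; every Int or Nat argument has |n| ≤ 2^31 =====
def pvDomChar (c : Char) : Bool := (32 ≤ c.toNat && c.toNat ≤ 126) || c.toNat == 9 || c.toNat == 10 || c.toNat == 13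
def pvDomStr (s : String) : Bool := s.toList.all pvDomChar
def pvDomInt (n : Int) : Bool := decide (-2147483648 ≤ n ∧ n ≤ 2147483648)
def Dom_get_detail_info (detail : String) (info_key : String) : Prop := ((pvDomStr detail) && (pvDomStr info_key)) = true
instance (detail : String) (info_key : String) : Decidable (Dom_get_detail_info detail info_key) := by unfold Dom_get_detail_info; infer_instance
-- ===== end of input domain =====

-- B replaces A's char-by-char while/break/continue state machine by locate-terminator-then-filter
-- (cut at the first comma, or drop a lone trailing period, then filter out spaces and colons); equal output, similar cost.

-- ===== PORT A =====
-- A's while-loop over index i, as structural recursion over the remaining suffix detail[i:]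
-- (the state (i, info) becomes (suffix, info); "i == len(detail) - 1" is "rest = []").
def pvLoopA : List Char → List Char → List Char
  | [], info => info
  | c :: rest, info =>
    if c = ',' ∨ (c = '.' ∧ rest = []) then info
    else if c = ' ' ∨ c = ':' then pvLoopA rest info
    else pvLoopA rest (info ++ [c])

def get_detail_info (detail : String) (info_key : String) : String :=
  -- i = detail.find(info_key) + len(info_key); i ≥ 0 always (find ≥ -1, and find = -1 forces len(info_key) ≥ 1),
  -- so detail[i:] is the plain suffix from i, taken with List.drop.
  let i : Int := PySem.Str.find detail info_key + (PySem.Str.len info_key : Int)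
  String.mk (pvLoopA (detail.toList.drop i.toNat) [])

-- ===== PORT B =====
-- Source B: segment[:segment.index(',')] (guarded by ',' in segment) is the prefix before the first comma,
-- ported as takeWhile (· ≠ ','); the join-over-generator is List.filter.
def get_detail_info_alt (detail : String) (info_key : String) : String :=
  let i : Int := PySem.Str.find detail info_key + (PySem.Str.len info_key : Int)
  let seg : List Char := detail.toList.drop i.toNat
  let seg2 : List Char :=
    if PySem.Chars.isIn [','] seg then seg.takeWhile (fun c => !(c == ','))
    else if PySem.Chars.endswith seg ['.'] then seg.dropLast
    else seg
  String.mk (seg2.filter (fun c => !(c == ' ' || c == ':')))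

-- ===== PRECONDITION & SPEC =====
def Spec_get_detail_info (detail : String) (info_key : String) (out : String) : Prop := out = get_detail_info_alt detail info_key
instance (detail : String) (info_key : String) (out : String) : Decidable (Spec_get_detail_info detail info_key out) := by unfold Spec_get_detail_info; infer_instance

-- ===== CLAIM (what is proved, stated in full; the proofs are below) =====
def Claim_equal_get_detail_info : Prop := ∀ (detail : String) (info_key : String), Dom_get_detail_info detail info_key → Spec_get_detail_info detail info_key (get_detail_info detail info_key)

-- ===== LEMMAS AND PROOFS =====

-- A's loop without its accumulator.
def pvCore : List Char → List Char
  | [] => []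
  | c :: rest =>
    if c = ',' ∨ (c = '.' ∧ rest = []) then []
    else if c = ' ' ∨ c = ':' then pvCore rest
    else c :: pvCore rest

lemma pvLoopA_acc (s : List Char) : ∀ acc : List Char, pvLoopA s acc = acc ++ pvCore s := by
  induction s with
  | nil => intro acc; simp [pvLoopA, pvCore]
  | cons c rest ih =>
    intro acc
    by_cases h1 : c = ',' ∨ (c = '.' ∧ rest = [])
    · simp [pvLoopA, pvCore, h1]
    · by_cases h2 : c = ' ' ∨ c = ':'
      · simp [pvLoopA, pvCore, h1, h2, ih]
      · simp [pvLoopA, pvCore, h1, h2, ih]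

lemma pv_isIn_singleton (c : Char) (l : List Char) : PySem.Chars.isIn [c] l = true ↔ c ∈ l := by
  rw [PySem.Chars.isIn_iff_infix]
  constructor
  · intro h; exact h.mem (List.mem_singleton_self c)
  · intro h
    obtain ⟨s, t, rfl⟩ := List.append_of_mem h
    exact ⟨s, t, by simp⟩

lemma pv_endswith_singleton (c : Char) (l : List Char) :
    PySem.Chars.endswith l [c] = true ↔ l.getLast? = some c := by
  rw [PySem.Chars.endswith_iff, List.getLast?_eq_some_iff]
  constructor
  · rintro ⟨s, rfl⟩; exact ⟨s, rfl⟩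
  · rintro ⟨s, rfl⟩; exact ⟨s, rfl⟩

lemma pvCore_eq (s : List Char) :
    pvCore s =
      (if ',' ∈ s then s.takeWhile (fun c => !(c == ','))
       else if s.getLast? = some '.' then s.dropLast
       else s).filter (fun c => !(c == ' ' || c == ':')) := by
  induction s with
  | nil => simp [pvCore]
  | cons c rest ih =>
    by_cases hc : c = ','
    · subst hc; simp [pvCore, List.takeWhile_cons]
    · by_cases hdot : c = '.' ∧ rest = []
      · obtain ⟨rfl, rfl⟩ := hdot
        simp [pvCore]
      · have hA : pvCore (c :: rest) =
            if c = ',' ∨ (c = '.' ∧ rest = []) then []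
            else if c = ' ' ∨ c = ':' then pvCore rest else c :: pvCore rest := rfl
        rw [hA, if_neg (by tauto), ih]
        rcases rest with _ | ⟨b, t⟩
        · -- rest = [], c ≠ ',' and c ≠ '.'
          have hcd : c ≠ '.' := fun h => hdot ⟨h, rfl⟩
          by_cases h2 : c = ' ' ∨ c = ':'
          · rw [if_pos h2]
            rcases h2 with rfl | rfl <;> simp [hc, hcd]
          · rw [if_neg h2]
            push_neg at h2
            simp [hc, hcd, Ne.symm hc, List.filter_cons, h2.1, h2.2]
        · -- rest = b :: t nonempty
          have hmem : (',' ∈ c :: b :: t) ↔ (',' ∈ b :: t) := by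
            simp [List.mem_cons, Ne.symm hc]
          have hlast : (c :: b :: t).getLast? = (b :: t).getLast? := by simp
          by_cases h2 : c = ' ' ∨ c = ':'
          · rw [if_pos h2]
            have hf : (fun c => !(c == ' ' || c == ':')) c = false := by
              rcases h2 with rfl | rfl <;> simp
            by_cases hm : ',' ∈ b :: t
            · simp [hmem, hm, List.takeWhile_cons, hc, List.filter_cons, hf] <;> tauto
            · by_cases hl : (b :: t).getLast? = some '.'
              · simp [hmem, hm, hlast, hl, List.dropLast_cons₂, List.filter_cons, hf] <;> tauto
              · simp [hmem, hm, hlast, hl, List.filter_cons, hf] <;> tauto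
          · rw [if_neg h2]
            have hf : (fun c => !(c == ' ' || c == ':')) c = true := by
              push_neg at h2; simp [h2.1, h2.2]
            by_cases hm : ',' ∈ b :: t
            · simp [hmem, hm, List.takeWhile_cons, hc, List.filter_cons, hf] <;> tauto
            · by_cases hl : (b :: t).getLast? = some '.'
              · simp [hmem, hm, hlast, hl, List.dropLast_cons₂, List.filter_cons, hf] <;> tauto
              · simp [hmem, hm, hlast, hl, List.filter_cons, hf] <;> tauto

-- ===== VERDICT (by name: the statement is the Claim_ definition above) =====
theorem get_detail_info_spec : Claim_equal_get_detail_info := by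
  intro detail info_key _
  unfold Spec_get_detail_info get_detail_info get_detail_info_alt
  simp only []
  rw [pvLoopA_acc, List.nil_append, pvCore_eq]
  congr 1
  simp only [pv_isIn_singleton, pv_endswith_singleton]
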